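-- pv_equiv track=rewrite | github.com/atulnayak55/book | backend/merge_unipd_course_csvs.py | choose_canonical_program_name
-- ===== SOURCE A (Python) =====
-- def is_track_variant(name: str) -> bool:
--     return " - " in name
--
-- def choose_canonical_program_name(code: str, old_names: set[str], new_names: set[str]) -> str:
--     new_base_names = sorted(name for name in new_names if not is_track_variant(name))
--     if new_base_names:
--         return new_base_names[0]
--
--     old_base_names = sorted(name for name in old_names if not is_track_variant(name))
--     if old_base_names:
--         return old_base_names[0]
--
--     if new_names:
--         return sorted(new_names, key=lambda value: (value.count(" - "), len(value), value))[0]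
--
--     if old_names:
--         return sorted(old_names, key=lambda value: (value.count(" - "), len(value), value))[0]
--
--     return code
-- ===== SOURCE B (Python) =====
-- def is_track_variant(name: str) -> bool:
--     return " - " in name
--
-- def _key(tier, name):
--     # base names sort before every variant, in their own tier by name alone;
--     # variants two tiers later by (count, len, name)
--     if is_track_variant(name):
--         return (tier + 2, name.count(" - "), len(name), name)
--     return (tier, 0, 0, name)
--
-- def choose_canonical_program_name(code: str, old_names: set[str], new_names: set[str]) -> str:
--     best = None  # (key, name) with minimal key seen so far
--     for tier, names in ((0, new_names), (1, old_names)):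
--         for name in names:
--             k = _key(tier, name)
--             if best is None or k < best[0]:
--                 best = (k, name)
--     return code if best is None else best[1]
-- ===== Notes on version B (the rewrite author's own statement) =====
-- stated objective: alternative
-- what changed: Replaces A's four sort-then-take-head tiers (sort base new names, base old names, all new, all old) by a single linear scan over all names tagged with a (tier, count, len, name) key, returning the name with the minimal key; no sorting at all.
import Mathlib
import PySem

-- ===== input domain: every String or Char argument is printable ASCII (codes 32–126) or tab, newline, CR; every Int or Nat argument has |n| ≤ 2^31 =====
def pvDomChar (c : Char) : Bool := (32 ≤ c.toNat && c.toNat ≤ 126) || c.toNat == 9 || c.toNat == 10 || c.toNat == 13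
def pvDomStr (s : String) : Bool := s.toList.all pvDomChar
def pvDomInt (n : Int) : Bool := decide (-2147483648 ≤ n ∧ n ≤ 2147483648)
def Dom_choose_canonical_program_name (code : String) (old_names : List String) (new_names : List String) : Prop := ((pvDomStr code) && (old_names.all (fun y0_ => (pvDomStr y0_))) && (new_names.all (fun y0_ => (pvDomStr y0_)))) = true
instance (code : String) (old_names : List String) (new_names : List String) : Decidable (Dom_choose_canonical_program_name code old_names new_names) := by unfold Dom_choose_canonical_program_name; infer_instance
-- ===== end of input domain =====

-- B replaces A's four sort-then-take-head passes by a single linear scan that keeps the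
-- candidate with the minimal (tier, count, len, name) key; objective: alternative (no sorting).


-- ===== PORT A =====
def is_track_variant (name : String) : Bool := PySem.Str.isIn " - " name

-- Python's key lambda (value.count(" - "), len(value), value); the Lex product carries
-- Python's lexicographic tuple order (Prod's plain < would be the pointwise one).
def variantKey (value : String) : Lex (Nat × Lex (Int × String)) :=
  toLex (PySem.Str.count value " - ", toLex (PySem.Str.len value, value))

-- 'if xs: return sorted(xs, …)[0]' is rendered as a match on the sorted list: sorted(xs) is
-- [] exactly when xs is [] (PySem.List.sorted_eq_nil_iff), so the branch tests coincide.
def choose_canonical_program_name (code : String) (old_names : List String) (new_names : List String) : String :=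
  match PySem.List.sorted (new_names.filter (fun name => !is_track_variant name)) (fun x => x) false with
  | n :: _ => n
  | [] =>
    match PySem.List.sorted (old_names.filter (fun name => !is_track_variant name)) (fun x => x) false with
    | n :: _ => n
    | [] =>
      match PySem.List.sorted new_names variantKey false with
      | n :: _ => n
      | [] =>
        match PySem.List.sorted old_names variantKey false with
        | n :: _ => n
        | [] => code

-- ===== PORT B =====
-- B's key _key(tier, name): a base name sorts in its own tier by name alone; a variant two
-- tiers later by (count, len, name).
def bKey (tier : Nat) (name : String) : Nat × Nat × Int × String :=
  if is_track_variant name then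
    (tier + 2, PySem.Str.count name " - ", PySem.Str.len name, name)
  else
    (tier, 0, 0, name)

-- hand port of Python's 'k < best[0]' on 4-tuples (lexicographic; exact for int/str components)
def keyLt (a b : Nat × Nat × Int × String) : Bool :=
  decide (a.1 < b.1) || (a.1 == b.1 && (decide (a.2.1 < b.2.1) || (a.2.1 == b.2.1 &&
    (decide (a.2.2.1 < b.2.2.1) || (a.2.2.1 == b.2.2.1 && decide (a.2.2.2 < b.2.2.2))))))

def bStep (tier : Nat) (best : Option ((Nat × Nat × Int × String) × String))
    (name : String) : Option ((Nat × Nat × Int × String) × String) :=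
  let k := bKey tier name
  match best with
  | none => some (k, name)
  | some (bk, bn) => if keyLt k bk then some (k, name) else some (bk, bn)

def choose_canonical_program_name_alt (code : String) (old_names : List String) (new_names : List String) : String :=
  match old_names.foldl (bStep 1) (new_names.foldl (bStep 0) none) with
  | some (_, n) => n
  | none => code

-- ===== PRECONDITION & SPEC =====
def Spec_choose_canonical_program_name (code : String) (old_names : List String) (new_names : List String) (out : String) : Prop := out = choose_canonical_program_name_alt code old_names new_names
instance (code : String) (old_names : List String) (new_names : List String) (out : String) : Decidable (Spec_choose_canonical_program_name code old_names new_names out) := by unfold Spec_choose_canonical_program_name; infer_instance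

-- ===== CLAIM (what is proved, stated in full; the proofs are below) =====
def Claim_equal_choose_canonical_program_name : Prop := ∀ (code : String) (old_names : List String) (new_names : List String), Dom_choose_canonical_program_name code old_names new_names → Spec_choose_canonical_program_name code old_names new_names (choose_canonical_program_name code old_names new_names)

-- ===== LEMMAS AND PROOFS =====

-- Prop-level view of B's 4-tuple key as a lexicographic product (proof-only)
def kOrd (a : Nat × Nat × Int × String) : Lex (Nat × Lex (Nat × Lex (Int × String))) :=
  toLex (a.1, toLex (a.2.1, toLex (a.2.2.1, a.2.2.2)))

lemma keyLt_iff (a b : Nat × Nat × Int × String) : keyLt a b = true ↔ kOrd a < kOrd b := by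
  simp only [kOrd, Prod.Lex.toLex_lt_toLex, keyLt, Bool.or_eq_true, Bool.and_eq_true,
    beq_iff_eq, decide_eq_true_eq]

lemma keyLt_false_iff (a b : Nat × Nat × Int × String) :
    keyLt a b = false ↔ kOrd b ≤ kOrd a := by
  rw [Bool.eq_false_iff, Ne, keyLt_iff, not_lt]

lemma kOrd_inj {a b : Nat × Nat × Int × String} (h : kOrd a = kOrd b) : a = b := by
  rcases a with ⟨a1, a2, a3, a4⟩; rcases b with ⟨b1, b2, b3, b4⟩
  simp only [kOrd, toLex_inj, Prod.mk.injEq] at h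
  simp [h.1, h.2.1, h.2.2.1, h.2.2.2]

lemma keyLt_conn {a b : Nat × Nat × Int × String}
    (h1 : keyLt a b = false) (h2 : keyLt b a = false) : a = b :=
  kOrd_inj (le_antisymm ((keyLt_false_iff b a).mp h2) ((keyLt_false_iff a b).mp h1))

lemma bKey_name (t : Nat) (n : String) : (bKey t n).2.2.2 = n := by
  unfold bKey; split <;> rfl

lemma bKey_inj_name {t₁ t₂ : Nat} {n₁ n₂ : String} (h : bKey t₁ n₁ = bKey t₂ n₂) : n₁ = n₂ := by
  have := congrArg (fun k => k.2.2.2) h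
  simpa [bKey_name] using this

-- the tagged candidate list B scans (proof-only abbreviation)
def cands (old_names new_names : List String) : List (Nat × String) :=
  new_names.map (fun n => (0, n)) ++ old_names.map (fun n => (1, n))

def stepP (best : Option ((Nat × Nat × Int × String) × String))
    (p : Nat × String) : Option ((Nat × Nat × Int × String) × String) :=
  bStep p.1 best p.2

lemma alt_eq_fold_cands (code : String) (old_names new_names : List String) :
    choose_canonical_program_name_alt code old_names new_names =
      match (cands old_names new_names).foldl stepP none with
      | some (_, n) => n
      | none => code := by
  simp [choose_canonical_program_name_alt, cands, List.foldl_append, List.foldl_map, stepP]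

lemma fold_some (l : List (Nat × String)) :
    ∀ (k0 : Nat × Nat × Int × String) (n0 : String),
    ∃ k n, l.foldl stepP (some (k0, n0)) = some (k, n) ∧
      ((k, n) = (k0, n0) ∨ ∃ t, (t, n) ∈ l ∧ k = bKey t n) ∧
      keyLt k0 k = false ∧ ∀ p ∈ l, keyLt (bKey p.1 p.2) k = false := by
  induction l with
  | nil =>
    intro k0 n0
    exact ⟨k0, n0, rfl, Or.inl rfl, (keyLt_false_iff _ _).mpr le_rfl, by simp⟩
  | cons p rest ih =>
    intro k0 n0
    by_cases h : keyLt (bKey p.1 p.2) k0 = true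
    · obtain ⟨k, n, hf, hm, hle, hall⟩ := ih (bKey p.1 p.2) p.2
      refine ⟨k, n, ?_, ?_, ?_, ?_⟩
      · simpa [List.foldl_cons, stepP, bStep, h] using hf
      · rcases hm with he | ⟨t, ht, hk⟩
        · rw [Prod.mk.injEq] at he
          exact Or.inr ⟨p.1, by simp [he.2], by rw [he.1, he.2]⟩
        · exact Or.inr ⟨t, by simp [ht], hk⟩
      · -- Kp < k0 and k ≤ Kp give k ≤ k0
        refine (keyLt_false_iff _ _).mpr (le_trans ((keyLt_false_iff _ _).mp hle) ?_)
        exact le_of_lt ((keyLt_iff _ _).mp h)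
      · intro q hq
        rcases List.mem_cons.mp hq with rfl | hq
        · exact hle
        · exact hall q hq
    · obtain ⟨k, n, hf, hm, hle, hall⟩ := ih k0 n0
      refine ⟨k, n, ?_, ?_, hle, ?_⟩
      · simpa [List.foldl_cons, stepP, bStep, h] using hf
      · rcases hm with he | ⟨t, ht, hk⟩
        · exact Or.inl he
        · exact Or.inr ⟨t, by simp [ht], hk⟩
      · intro q hq
        rcases List.mem_cons.mp hq with rfl | hq
        · -- k ≤ k0 ≤ Kq
          have h' : keyLt (bKey q.1 q.2) k0 = false := by simpa using h
          exact (keyLt_false_iff _ _).mpr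
            (le_trans ((keyLt_false_iff _ _).mp hle) ((keyLt_false_iff _ _).mp h'))
        · exact hall q hq

-- B returns the name of any input pair whose key is minimal over all candidates.
lemma alt_eq_of_min (code : String) (old_names new_names : List String)
    (tA : Nat) (nA : String)
    (hmem : (tA, nA) ∈ cands old_names new_names)
    (hmin : ∀ p ∈ cands old_names new_names, keyLt (bKey p.1 p.2) (bKey tA nA) = false) :
    choose_canonical_program_name_alt code old_names new_names = nA := by
  rw [alt_eq_fold_cands]
  rcases hq : cands old_names new_names with _ | ⟨q, rest⟩
  · rw [hq] at hmem; simp at hmem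
  · rw [hq] at hmem hmin
    have hfold : (q :: rest).foldl stepP none = rest.foldl stepP (some (bKey q.1 q.2, q.2)) := by
      simp [List.foldl_cons, stepP, bStep]
    obtain ⟨k, n, hf, hm, hle, hall⟩ := fold_some rest (bKey q.1 q.2) q.2
    rw [hfold, hf]
    -- k is the key of some candidate
    have hkcand : ∃ t, (t, n) ∈ q :: rest ∧ k = bKey t n := by
      rcases hm with he | ⟨t, ht, hk⟩
      · rw [Prod.mk.injEq] at he
        refine ⟨q.1, ?_, ?_⟩
        · simp [he.2]
        · rw [he.1, he.2]
      · exact ⟨t, List.mem_cons_of_mem _ ht, hk⟩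
    obtain ⟨t, htmem, hk⟩ := hkcand
    have h1 : keyLt (bKey t n) (bKey tA nA) = false := hmin (t, n) htmem
    have h2 : keyLt (bKey tA nA) (bKey t n) = false := by
      rw [← hk]
      rcases List.mem_cons.mp hmem with he | hmem'
      · subst he
        simpa only [] using hle
      · have h3 := hall (tA, nA) hmem'
        simpa only [] using h3
    have hkey : bKey t n = bKey tA nA := keyLt_conn h1 h2
    exact bKey_inj_name hkey

lemma mem_cands_iff (old_names new_names : List String) (p : Nat × String) :
    p ∈ cands old_names new_names ↔
      (p.1 = 0 ∧ p.2 ∈ new_names) ∨ (p.1 = 1 ∧ p.2 ∈ old_names) := by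
  rcases p with ⟨t, m⟩
  simp [cands, List.mem_append, List.mem_map, Prod.ext_iff, and_comm, eq_comm]

lemma kOrd_bKey_base {n : String} (t : Nat) (h : is_track_variant n = false) :
    kOrd (bKey t n) = toLex (t, toLex (0, toLex (0, n))) := by simp [bKey, kOrd, h]

lemma kOrd_bKey_variant {n : String} (t : Nat) (h : is_track_variant n = true) :
    kOrd (bKey t n) = toLex (t + 2, variantKey n) := by simp [bKey, kOrd, variantKey, h]

lemma tier_bKey (t : Nat) (n : String) :
    (ofLex (kOrd (bKey t n))).1 = if is_track_variant n then t + 2 else t := by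
  unfold bKey kOrd; split <;> simp

-- tiers differ strictly: no element of the higher tier is below the lower one
lemma keyLt_false_of_tier_lt {t₁ t₂ : Nat} (n₁ n₂ : String)
    (h : (ofLex (kOrd (bKey t₁ n₁))).1 < (ofLex (kOrd (bKey t₂ n₂))).1) :
    keyLt (bKey t₂ n₂) (bKey t₁ n₁) = false := by
  refine (keyLt_false_iff _ _).mpr (le_of_lt ?_)
  rw [show kOrd (bKey t₁ n₁) = toLex (ofLex (kOrd (bKey t₁ n₁))) from rfl,
      show kOrd (bKey t₂ n₂) = toLex (ofLex (kOrd (bKey t₂ n₂))) from rfl]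
  exact Prod.Lex.toLex_lt_toLex.mpr (Or.inl h)

theorem choose_canonical_program_name_spec : Claim_equal_choose_canonical_program_name := by
  intro code old_names new_names _
  unfold Spec_choose_canonical_program_name
  unfold choose_canonical_program_name
  rcases hs1 : PySem.List.sorted (new_names.filter (fun name => !is_track_variant name)) (fun x => x) false with _ | ⟨n0, tl1⟩
  case cons =>
    -- tier 0: a base new name wins, smallest by name
    have hn0f : n0 ∈ new_names.filter (fun name => !is_track_variant name) :=
      (PySem.List.mem_sorted _ _ _ _).mp (hs1 ▸ List.mem_cons_self)
    have hn0new : n0 ∈ new_names := List.mem_of_mem_filter hn0f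
    have hn0base : is_track_variant n0 = false := by
      have := List.of_mem_filter hn0f; simpa using this
    refine (alt_eq_of_min code old_names new_names 0 n0 ?_ ?_).symm
    · exact (mem_cands_iff _ _ _).mpr (Or.inl ⟨rfl, hn0new⟩)
    · intro p hp
      rcases (mem_cands_iff _ _ _).mp hp with ⟨ht, hm⟩ | ⟨ht, hm⟩
      · by_cases hv : is_track_variant p.2
        · exact keyLt_false_of_tier_lt _ _ (by simp [tier_bKey, hv, hn0base, ht])
        · have hpf : p.2 ∈ new_names.filter (fun name => !is_track_variant name) := by
            simp [List.mem_filter, hm, hv]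
          have hle : n0 ≤ p.2 := PySem.List.key_head_sorted_le _ (fun x => x) hs1 p.2 hpf
          refine (keyLt_false_iff _ _).mpr ?_
          rw [kOrd_bKey_base 0 hn0base, ht, kOrd_bKey_base 0 (by simpa using hv)]
          exact Prod.Lex.toLex_le_toLex.mpr (Or.inr ⟨rfl,
            Prod.Lex.toLex_le_toLex.mpr (Or.inr ⟨rfl,
              Prod.Lex.toLex_le_toLex.mpr (Or.inr ⟨rfl, hle⟩)⟩)⟩)
      · exact keyLt_false_of_tier_lt _ _ (by simp [tier_bKey, hn0base, ht]; split <;> omega)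
  case nil =>
  have hnf : ∀ n ∈ new_names, is_track_variant n = true := by
    have := (PySem.List.sorted_eq_nil_iff _ _ _).mp hs1
    intro n hn
    have := List.filter_eq_nil_iff.mp this n hn
    simpa using this
  rcases hs2 : PySem.List.sorted (old_names.filter (fun name => !is_track_variant name)) (fun x => x) false with _ | ⟨n0, tl2⟩
  case cons =>
    -- tier 1: a base old name wins
    have hn0f : n0 ∈ old_names.filter (fun name => !is_track_variant name) :=
      (PySem.List.mem_sorted _ _ _ _).mp (hs2 ▸ List.mem_cons_self)
    have hn0old : n0 ∈ old_names := List.mem_of_mem_filter hn0f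
    have hn0base : is_track_variant n0 = false := by
      have := List.of_mem_filter hn0f; simpa using this
    refine (alt_eq_of_min code old_names new_names 1 n0 ?_ ?_).symm
    · exact (mem_cands_iff _ _ _).mpr (Or.inr ⟨rfl, hn0old⟩)
    · intro p hp
      rcases (mem_cands_iff _ _ _).mp hp with ⟨ht, hm⟩ | ⟨ht, hm⟩
      · exact keyLt_false_of_tier_lt _ _ (by simp [tier_bKey, hnf p.2 hm, hn0base, ht])
      · by_cases hv : is_track_variant p.2
        · exact keyLt_false_of_tier_lt _ _ (by simp [tier_bKey, hv, hn0base, ht])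
        · have hpf : p.2 ∈ old_names.filter (fun name => !is_track_variant name) := by
            simp [List.mem_filter, hm, hv]
          have hle : n0 ≤ p.2 := PySem.List.key_head_sorted_le _ (fun x => x) hs2 p.2 hpf
          refine (keyLt_false_iff _ _).mpr ?_
          rw [kOrd_bKey_base 1 hn0base, ht, kOrd_bKey_base 1 (by simpa using hv)]
          exact Prod.Lex.toLex_le_toLex.mpr (Or.inr ⟨rfl,
            Prod.Lex.toLex_le_toLex.mpr (Or.inr ⟨rfl,
              Prod.Lex.toLex_le_toLex.mpr (Or.inr ⟨rfl, hle⟩)⟩)⟩)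
  case nil =>
  have hof : ∀ n ∈ old_names, is_track_variant n = true := by
    have := (PySem.List.sorted_eq_nil_iff _ _ _).mp hs2
    intro n hn
    have := List.filter_eq_nil_iff.mp this n hn
    simpa using this
  rcases hs3 : PySem.List.sorted new_names variantKey false with _ | ⟨n0, tl3⟩
  case cons =>
    -- tier 2: all names are variants; smallest new variant by (count, len, name)
    have hn0new : n0 ∈ new_names := (PySem.List.mem_sorted _ _ _ _).mp (hs3 ▸ List.mem_cons_self)
    refine (alt_eq_of_min code old_names new_names 0 n0 ?_ ?_).symm
    · exact (mem_cands_iff _ _ _).mpr (Or.inl ⟨rfl, hn0new⟩)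
    · intro p hp
      rcases (mem_cands_iff _ _ _).mp hp with ⟨ht, hm⟩ | ⟨ht, hm⟩
      · have hle : variantKey n0 ≤ variantKey p.2 :=
          PySem.List.key_head_sorted_le _ variantKey hs3 p.2 hm
        refine (keyLt_false_iff _ _).mpr ?_
        rw [kOrd_bKey_variant 0 (hnf n0 hn0new), ht, kOrd_bKey_variant 0 (hnf p.2 hm)]
        exact Prod.Lex.toLex_le_toLex.mpr (Or.inr ⟨rfl, hle⟩)
      · exact keyLt_false_of_tier_lt _ _ (by simp [tier_bKey, hnf n0 hn0new, hof p.2 hm, ht])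
  case nil =>
  have hnew : new_names = [] := (PySem.List.sorted_eq_nil_iff _ _ _).mp hs3
  rcases hs4 : PySem.List.sorted old_names variantKey false with _ | ⟨n0, tl4⟩
  case cons =>
    -- tier 3: smallest old variant by (count, len, name)
    have hn0old : n0 ∈ old_names := (PySem.List.mem_sorted _ _ _ _).mp (hs4 ▸ List.mem_cons_self)
    refine (alt_eq_of_min code old_names new_names 1 n0 ?_ ?_).symm
    · exact (mem_cands_iff _ _ _).mpr (Or.inr ⟨rfl, hn0old⟩)
    · intro p hp
      rcases (mem_cands_iff _ _ _).mp hp with ⟨ht, hm⟩ | ⟨ht, hm⟩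
      · rw [hnew] at hm; simp at hm
      · have hle : variantKey n0 ≤ variantKey p.2 :=
          PySem.List.key_head_sorted_le _ variantKey hs4 p.2 hm
        refine (keyLt_false_iff _ _).mpr ?_
        rw [kOrd_bKey_variant 1 (hof n0 hn0old), ht, kOrd_bKey_variant 1 (hof p.2 hm)]
        exact Prod.Lex.toLex_le_toLex.mpr (Or.inr ⟨rfl, hle⟩)
  case nil =>
    have hold : old_names = [] := (PySem.List.sorted_eq_nil_iff _ _ _).mp hs4
    rw [alt_eq_fold_cands]
    simp [cands, hnew, hold]
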